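-- pv_equiv track=rewrite | github.com/coval-ai/benchmarks | wer_calculator.py | convert_ordinals
-- ===== SOURCE A (Python) =====
-- def convert_ordinals(sentence):
--     # Dictionary mapping ordinal words to their numerical form
--     ordinal_map = {
--         'first': '1st',
--         'second': '2nd',
--         'third': '3rd',
--         'fourth': '4th',
--         'fifth': '5th',
--         'sixth': '6th',
--         'seventh': '7th',
--         'eighth': '8th',
--         'ninth': '9th',
--         'tenth': '10th',
--         'eleventh': '11th',
--         'twelfth': '12th',
--         'thirteenth': '13th',
--         'fourteenth': '14th',
--         'fifteenth': '15th',
--         'sixteenth': '16th',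
--         'seventeenth': '17th',
--         'eighteenth': '18th',
--         'nineteenth': '19th',
--         'twentieth': '20th',
--         'thirtieth': '30th',
--         'fortieth': '40th',
--         'fiftieth': '50th',
--         'sixtieth': '60th',
--         'seventieth': '70th',
--         'eightieth': '80th',
--         'ninetieth': '90th',
--         'hundredth': '100th',
--         'thousandth': '1000th',
--         'millionth': '1000000th',
--         'billionth': '1000000000th'
--     }
--
--     # Also handle compound ordinals like "twenty-first", "twenty-second", etc.
--     tens = {
--         'twenty': 20,
--         'thirty': 30,
--         'forty': 40,
--         'fifty': 50,
--         'sixty': 60,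
--         'seventy': 70,
--         'eighty': 80,
--         'ninety': 90
--     }
--
--     units = {
--         'first': (1, 'st'),
--         'second': (2, 'nd'),
--         'third': (3, 'rd'),
--         'fourth': (4, 'th'),
--         'fifth': (5, 'th'),
--         'sixth': (6, 'th'),
--         'seventh': (7, 'th'),
--         'eighth': (8, 'th'),
--         'ninth': (9, 'th')
--     }
--
--     # Split the sentence into words
--     words = sentence.split()
--     result_words = []
--
--     for i, current_word in enumerate(words):
--         current = current_word.lower().rstrip(',.;:!?')
--         punctuation = ''.join(c for c in current_word if c in '.,:;!?')
--
--         # Check for hyphenated ordinals like "twenty-first"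
--         if '-' in current:
--             parts = current.split('-')
--             if len(parts) == 2 and parts[0] in tens and parts[1] in units:
--                 num_value = tens[parts[0]] + units[parts[1]][0]
--                 suffix = units[parts[1]][1]
--                 # Handle exceptions for 11th, 12th, 13th
--                 if num_value % 100 in [11, 12, 13]:
--                     suffix = 'th'
--                 result_words.append(f"{num_value}{suffix}{punctuation}")
--                 continue
--
--         # Check for simple ordinals like "seventh"
--         if current in ordinal_map:
--             # Preserve any capitalization
--             if current_word[0].isupper():
--                 result = ordinal_map[current].capitalize() + punctuation
--             else:
--                 result = ordinal_map[current] + punctuation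
--             result_words.append(result)
--         else:
--             result_words.append(current_word)
--
--     return ' '.join(result_words)
-- ===== SOURCE B (Python) =====
-- def convert_ordinals(sentence):
--     # One flat lookup table, word -> numeric ordinal: every base ordinal and
--     # every tens-units compound ('twenty-first' -> '21st') written out once,
--     # so the per-word work is a single dict lookup with no splitting or arithmetic.
--     table = {
--     'first': '1st', 'second': '2nd', 'third': '3rd',
--     'fourth': '4th', 'fifth': '5th', 'sixth': '6th',
--     'seventh': '7th', 'eighth': '8th', 'ninth': '9th',
--     'tenth': '10th', 'eleventh': '11th', 'twelfth': '12th',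
--     'thirteenth': '13th', 'fourteenth': '14th', 'fifteenth': '15th',
--     'sixteenth': '16th', 'seventeenth': '17th', 'eighteenth': '18th',
--     'nineteenth': '19th', 'twentieth': '20th', 'thirtieth': '30th',
--     'fortieth': '40th', 'fiftieth': '50th', 'sixtieth': '60th',
--     'seventieth': '70th', 'eightieth': '80th', 'ninetieth': '90th',
--     'hundredth': '100th', 'thousandth': '1000th', 'millionth': '1000000th',
--     'billionth': '1000000000th', 'twenty-first': '21st', 'twenty-second': '22nd',
--     'twenty-third': '23rd', 'twenty-fourth': '24th', 'twenty-fifth': '25th',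
--     'twenty-sixth': '26th', 'twenty-seventh': '27th', 'twenty-eighth': '28th',
--     'twenty-ninth': '29th', 'thirty-first': '31st', 'thirty-second': '32nd',
--     'thirty-third': '33rd', 'thirty-fourth': '34th', 'thirty-fifth': '35th',
--     'thirty-sixth': '36th', 'thirty-seventh': '37th', 'thirty-eighth': '38th',
--     'thirty-ninth': '39th', 'forty-first': '41st', 'forty-second': '42nd',
--     'forty-third': '43rd', 'forty-fourth': '44th', 'forty-fifth': '45th',
--     'forty-sixth': '46th', 'forty-seventh': '47th', 'forty-eighth': '48th',
--     'forty-ninth': '49th', 'fifty-first': '51st', 'fifty-second': '52nd',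
--     'fifty-third': '53rd', 'fifty-fourth': '54th', 'fifty-fifth': '55th',
--     'fifty-sixth': '56th', 'fifty-seventh': '57th', 'fifty-eighth': '58th',
--     'fifty-ninth': '59th', 'sixty-first': '61st', 'sixty-second': '62nd',
--     'sixty-third': '63rd', 'sixty-fourth': '64th', 'sixty-fifth': '65th',
--     'sixty-sixth': '66th', 'sixty-seventh': '67th', 'sixty-eighth': '68th',
--     'sixty-ninth': '69th', 'seventy-first': '71st', 'seventy-second': '72nd',
--     'seventy-third': '73rd', 'seventy-fourth': '74th', 'seventy-fifth': '75th',
--     'seventy-sixth': '76th', 'seventy-seventh': '77th', 'seventy-eighth': '78th',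
--     'seventy-ninth': '79th', 'eighty-first': '81st', 'eighty-second': '82nd',
--     'eighty-third': '83rd', 'eighty-fourth': '84th', 'eighty-fifth': '85th',
--     'eighty-sixth': '86th', 'eighty-seventh': '87th', 'eighty-eighth': '88th',
--     'eighty-ninth': '89th', 'ninety-first': '91st', 'ninety-second': '92nd',
--     'ninety-third': '93rd', 'ninety-fourth': '94th', 'ninety-fifth': '95th',
--     'ninety-sixth': '96th', 'ninety-seventh': '97th', 'ninety-eighth': '98th',
--     'ninety-ninth': '99th',
--     }
--     out = []
--     for word in sentence.split():
--         key = word.lower().rstrip(',.;:!?')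
--         hit = table.get(key)
--         if hit is None:
--             out.append(word)
--         else:
--             out.append(hit + ''.join(c for c in word if c in '.,:;!?'))
--     return ' '.join(out)
-- ===== Notes on version B (the rewrite author's own statement) =====
-- stated objective: simpler
-- what changed: B uses one flat, fully spelled-out word-to-ordinal table (the 31 base ordinals plus all 72 tens-units compounds like 'twenty-first'->'21st') and a single first-match lookup per word, eliminating A's hyphen-splitting, tens+units arithmetic, 11/12/13 suffix exception and capitalize branch entirely.
import Mathlib
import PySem

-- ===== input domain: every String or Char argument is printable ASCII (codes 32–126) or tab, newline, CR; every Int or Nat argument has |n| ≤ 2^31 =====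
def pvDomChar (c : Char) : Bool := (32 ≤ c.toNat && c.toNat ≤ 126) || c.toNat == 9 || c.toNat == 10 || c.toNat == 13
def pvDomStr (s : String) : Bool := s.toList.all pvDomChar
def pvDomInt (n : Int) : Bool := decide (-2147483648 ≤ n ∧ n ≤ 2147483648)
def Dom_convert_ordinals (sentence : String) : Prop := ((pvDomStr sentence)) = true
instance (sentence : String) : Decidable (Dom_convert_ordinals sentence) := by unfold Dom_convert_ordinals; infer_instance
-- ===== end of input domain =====

-- B replaces A's hyphen-splitting/arithmetic branch and capitalize step by one flat, fully
-- spelled-out word→ordinal table (base ordinals plus every tens-units compound) and a single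
-- association-list lookup per word; objective: simpler.

-- ===== PORT A =====
def ordBase : List (String × String) := [("first", "1st"), ("second", "2nd"), ("third", "3rd"), ("fourth", "4th"), ("fifth", "5th"), ("sixth", "6th"), ("seventh", "7th"), ("eighth", "8th"), ("ninth", "9th"), ("tenth", "10th"), ("eleventh", "11th"), ("twelfth", "12th"), ("thirteenth", "13th"), ("fourteenth", "14th"), ("fifteenth", "15th"), ("sixteenth", "16th"), ("seventeenth", "17th"), ("eighteenth", "18th"), ("nineteenth", "19th"), ("twentieth", "20th"), ("thirtieth", "30th"), ("fortieth", "40th"), ("fiftieth", "50th"), ("sixtieth", "60th"), ("seventieth", "70th"), ("eightieth", "80th"), ("ninetieth", "90th"), ("hundredth", "100th"), ("thousandth", "1000th"), ("millionth", "1000000th"), ("billionth", "1000000000th")]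

def aOrdinalMap : PySem.Dict String String := PySem.Dict.mk ordBase
def aTens : PySem.Dict String Int := PySem.Dict.mk [("twenty", (20 : Int)), ("thirty", (30 : Int)), ("forty", (40 : Int)), ("fifty", (50 : Int)), ("sixty", (60 : Int)), ("seventy", (70 : Int)), ("eighty", (80 : Int)), ("ninety", (90 : Int))]
def aUnits : PySem.Dict String (Int × String) := PySem.Dict.mk [("first", ((1 : Int), "st")), ("second", ((2 : Int), "nd")), ("third", ((3 : Int), "rd")), ("fourth", ((4 : Int), "th")), ("fifth", ((5 : Int), "th")), ("sixth", ((6 : Int), "th")), ("seventh", ((7 : Int), "th")), ("eighth", ((8 : Int), "th")), ("ninth", ((9 : Int), "th"))]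

-- s.rstrip(chars): drop trailing characters that are in `chars` (exact; ASCII or not).
def pyRstrip (s chars : String) : String :=
  String.ofList ((s.toList.reverse.dropWhile (fun c => chars.toList.contains c)).reverse)

-- ''.join(c for c in w if c in '.,:;!?') — membership of a single char in a literal string is char membership (exact).
def pyPunct (w : String) : String :=
  String.ofList (w.toList.filter (fun c => ".,:;!?".toList.contains c))

-- s.capitalize(): first char upper-cased, rest lower-cased (exact on ASCII, which is all A applies it to).
def pyCapitalize (s : String) : String :=
  match s.toList with
  | [] => ""
  | c :: rest => String.ofList (PySem.Chars.upperChar c :: PySem.Chars.lower rest)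

-- the `if '-' in current: … continue` block as an Option (some = the branch fired and `continue` ran)
def aCompound (current : String) : Option String :=
  if PySem.Str.isIn "-" current then
    match PySem.Str.split? current "-" with      -- current.split('-'); sep is the nonempty literal '-'
    | some [p0, p1] =>                           -- len(parts) == 2
      match aTens.get? p0, aUnits.get? p1 with   -- parts[0] in tens and parts[1] in units
      | some tv, some (uv, suf) =>
          let num := tv + uv
          let suffix := if [(11 : Int), 12, 13].contains (PySem.Int.mod num 100) then "th" else suf
          some (PySem.Int.toStr num ++ suffix)
      | _, _ => none
    | _ => none
  else none

def procA (w : String) : String :=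
  let current := pyRstrip (PySem.Str.lower w) ",.;:!?"
  let punct := pyPunct w
  match aCompound current with
  | some s => s ++ punct
  | none =>
    match aOrdinalMap.get? current with
    | some v =>
      match w.toList with
      | c :: _ => if PySem.Chars.isupper c then pyCapitalize v ++ punct else v ++ punct
      | [] => w        -- unreachable: current ∈ keys forces w ≠ "" (Python would raise IndexError)
    | none => w

def convert_ordinals (sentence : String) : String :=
  PySem.Str.join " "
    ((PySem.List.enumerate (PySem.Str.split₀ sentence)).foldl (fun acc p => acc ++ [procA p.2]) [])

-- ===== PORT B =====
-- B's one flat literal table: the 31 base ordinals followed by all 72 tens-units compounds.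
def fullTable : List (String × String) := [("first", "1st"), ("second", "2nd"), ("third", "3rd"), ("fourth", "4th"), ("fifth", "5th"), ("sixth", "6th"), ("seventh", "7th"), ("eighth", "8th"), ("ninth", "9th"), ("tenth", "10th"), ("eleventh", "11th"), ("twelfth", "12th"), ("thirteenth", "13th"), ("fourteenth", "14th"), ("fifteenth", "15th"), ("sixteenth", "16th"), ("seventeenth", "17th"), ("eighteenth", "18th"), ("nineteenth", "19th"), ("twentieth", "20th"), ("thirtieth", "30th"), ("fortieth", "40th"), ("fiftieth", "50th"), ("sixtieth", "60th"), ("seventieth", "70th"), ("eightieth", "80th"), ("ninetieth", "90th"), ("hundredth", "100th"), ("thousandth", "1000th"), ("millionth", "1000000th"), ("billionth", "1000000000th"), ("twenty-first", "21st"), ("twenty-second", "22nd"), ("twenty-third", "23rd"), ("twenty-fourth", "24th"), ("twenty-fifth", "25th"), ("twenty-sixth", "26th"), ("twenty-seventh", "27th"), ("twenty-eighth", "28th"), ("twenty-ninth", "29th"), ("thirty-first", "31st"), ("thirty-second", "32nd"), ("thirty-third", "33rd"), ("thirty-fourth", "34th"), ("thirty-fifth", "35th"), ("thirty-sixth", "36th"),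 ("thirty-seventh", "37th"), ("thirty-eighth", "38th"), ("thirty-ninth", "39th"), ("forty-first", "41st"), ("forty-second", "42nd"), ("forty-third", "43rd"), ("forty-fourth", "44th"), ("forty-fifth", "45th"), ("forty-sixth", "46th"), ("forty-seventh", "47th"), ("forty-eighth", "48th"), ("forty-ninth", "49th"), ("fifty-first", "51st"), ("fifty-second", "52nd"), ("fifty-third", "53rd"), ("fifty-fourth", "54th"), ("fifty-fifth", "55th"), ("fifty-sixth", "56th"), ("fifty-seventh", "57th"), ("fifty-eighth", "58th"), ("fifty-ninth", "59th"), ("sixty-first", "61st"), ("sixty-second", "62nd"), ("sixty-third", "63rd"), ("sixty-fourth", "64th"), ("sixty-fifth", "65th"), ("sixty-sixth", "66th"), ("sixty-seventh", "67th"), ("sixty-eighth", "68th"), ("sixty-ninth", "69th"), ("seventy-first", "71st"), ("seventy-second", "72nd"), ("seventy-third", "73rd"), ("seventy-fourth", "74th"), ("seventy-fifth", "75th"), ("seventy-sixth", "76th"), ("seventy-seventh", "77th"), ("seventy-eighth", "78th"), ("seventy-ninth", "79th"), ("eighty-first", "81st"), ("eighty-second", "82nd"), ("eighty-third", "83rd"),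 ("eighty-fourth", "84th"), ("eighty-fifth", "85th"), ("eighty-sixth", "86th"), ("eighty-seventh", "87th"), ("eighty-eighth", "88th"), ("eighty-ninth", "89th"), ("ninety-first", "91st"), ("ninety-second", "92nd"), ("ninety-third", "93rd"), ("ninety-fourth", "94th"), ("ninety-fifth", "95th"), ("ninety-sixth", "96th"), ("ninety-seventh", "97th"), ("ninety-eighth", "98th"), ("ninety-ninth", "99th")]

-- one word of B's loop body: strip trailing punctuation from the lowered word, look the key up
-- in the flat association list (first match, as dict.get on a literal dict), reattach punctuation
def bWord (w : String) : String :=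
  let key := String.ofList (((PySem.Str.lower w).toList.reverse.dropWhile (fun c => ",.;:!?".toList.contains c)).reverse)
  match List.lookup key fullTable with
  | some hit => hit ++ String.ofList (w.toList.filter (fun c => ".,:;!?".toList.contains c))
  | none => w

def convert_ordinals_alt (sentence : String) : String :=
  PySem.Str.join " " ((PySem.Str.split₀ sentence).map bWord)

-- ===== PRECONDITION & SPEC =====
def Spec_convert_ordinals (sentence : String) (out : String) : Prop := out = convert_ordinals_alt sentence
instance (sentence : String) (out : String) : Decidable (Spec_convert_ordinals sentence out) := by unfold Spec_convert_ordinals; infer_instance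

-- ===== CLAIM =====
def Claim_equal_convert_ordinals : Prop := ∀ (sentence : String), Dom_convert_ordinals sentence → Spec_convert_ordinals sentence (convert_ordinals sentence)

-- ===== LEMMAS AND PROOFS =====

def compItems : List (String × String) := [("twenty-first", "21st"), ("twenty-second", "22nd"), ("twenty-third", "23rd"), ("twenty-fourth", "24th"), ("twenty-fifth", "25th"), ("twenty-sixth", "26th"), ("twenty-seventh", "27th"), ("twenty-eighth", "28th"), ("twenty-ninth", "29th"), ("thirty-first", "31st"), ("thirty-second", "32nd"), ("thirty-third", "33rd"), ("thirty-fourth", "34th"), ("thirty-fifth", "35th"), ("thirty-sixth", "36th"), ("thirty-seventh", "37th"), ("thirty-eighth", "38th"), ("thirty-ninth", "39th"), ("forty-first", "41st"), ("forty-second", "42nd"), ("forty-third", "43rd"), ("forty-fourth", "44th"), ("forty-fifth", "45th"), ("forty-sixth", "46th"), ("forty-seventh", "47th"), ("forty-eighth", "48th"), ("forty-ninth", "49th"), ("fifty-first", "51st"), ("fifty-second", "52nd"), ("fifty-third", "53rd"), ("fifty-fourth", "54th"), ("fifty-fifth", "55th"), ("fifty-sixth", "56th"), ("fifty-seventh",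 "57th"), ("fifty-eighth", "58th"), ("fifty-ninth", "59th"), ("sixty-first", "61st"), ("sixty-second", "62nd"), ("sixty-third", "63rd"), ("sixty-fourth", "64th"), ("sixty-fifth", "65th"), ("sixty-sixth", "66th"), ("sixty-seventh", "67th"), ("sixty-eighth", "68th"), ("sixty-ninth", "69th"), ("seventy-first", "71st"), ("seventy-second", "72nd"), ("seventy-third", "73rd"), ("seventy-fourth", "74th"), ("seventy-fifth", "75th"), ("seventy-sixth", "76th"), ("seventy-seventh", "77th"), ("seventy-eighth", "78th"), ("seventy-ninth", "79th"), ("eighty-first", "81st"), ("eighty-second", "82nd"), ("eighty-third", "83rd"), ("eighty-fourth", "84th"), ("eighty-fifth", "85th"), ("eighty-sixth", "86th"), ("eighty-seventh", "87th"), ("eighty-eighth", "88th"), ("eighty-ninth", "89th"), ("ninety-first", "91st"), ("ninety-second", "92nd"), ("ninety-third", "93rd"), ("ninety-fourth", "94th"), ("ninety-fifth", "95th"), ("ninety-sixth", "96th"), ("ninety-seventh", "97th"), ("ninety-eighth", "98th"), ("ninety-ninth", "99th")]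

set_option maxRecDepth 40000 in
theorem F0 : fullTable = ordBase ++ compItems := by decide

set_option maxRecDepth 40000 in
theorem F2 : ∀ c ∈ compItems.map Prod.fst, aCompound c = (PySem.Dict.mk compItems).get? c := by decide

set_option maxRecDepth 40000 in
theorem F3 : ∀ a ∈ aTens.keys, ∀ b ∈ aUnits.keys,
    String.ofList (a.toList ++ "-".toList ++ b.toList) ∈ compItems.map Prod.fst := by decide

set_option maxRecDepth 40000 in
theorem F4 : ∀ k ∈ compItems.map Prod.fst, k ∉ ordBase.map Prod.fst := by decide

set_option maxRecDepth 40000 in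
theorem F5 : ∀ v ∈ ordBase.map Prod.snd, pyCapitalize v = v := by decide

-- join over a snoc
theorem join_snoc (sep b : List Char) (xs : List (List Char)) (h : xs ≠ []) :
    PySem.Chars.join sep (xs ++ [b]) = PySem.Chars.join sep xs ++ sep ++ b := by
  induction xs with
  | nil => simp at h
  | cons x xs ih =>
      rcases xs with _ | ⟨y, ys⟩
      · simp [PySem.Chars.join, List.intercalate, List.intersperse]
      · have := ih (by simp)
        simp only [PySem.Chars.join, List.intercalate] at *
        simp [List.intersperse] at *
        simp [this]

theorem join_merge (sep a b : List Char) (xs : List (List Char)) :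
    PySem.Chars.join sep (xs ++ [a, b]) = PySem.Chars.join sep (xs ++ [a ++ sep ++ b]) := by
  rcases xs with _ | ⟨x, xs⟩
  · simp [PySem.Chars.join, List.intercalate, List.intersperse]
  · have h1 : ((x :: xs) ++ [a, b]) = ((x :: xs) ++ [a]) ++ [b] := by simp
    rw [h1, join_snoc sep b _ (by simp), join_snoc sep a _ (by simp),
        join_snoc sep (a ++ sep ++ b) _ (by simp)]
    simp [List.append_assoc]

theorem go_join (sep : List Char) : ∀ (fuel : Nat) (l cur : List Char) (acc : List (List Char)),
    PySem.Chars.join sep (PySem.Chars.splitOn.go sep fuel l cur acc)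
      = PySem.Chars.join sep (acc.reverse ++ [cur.reverse ++ l]) := by
  intro fuel
  induction fuel with
  | zero => intro l cur acc; rw [PySem.Chars.splitOn.go.eq_def]; simp
  | succ fuel ih =>
      intro l cur acc
      rw [PySem.Chars.splitOn.go.eq_def]
      rcases l with _ | ⟨c, rest⟩
      · simp
      · by_cases hp : sep.isPrefixOf (c :: rest) = true
        · simp only [hp, if_true]
          rw [ih]
          obtain ⟨t, ht⟩ := List.isPrefixOf_iff_prefix.mp hp
          have hd : List.drop sep.length (c :: rest) = t := by rw [← ht]; simp
          rw [hd]
          have : (cur.reverse :: acc).reverse ++ [([] : List Char).reverse ++ t]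
              = acc.reverse ++ [cur.reverse, t] := by simp
          rw [this, join_merge]
          rw [← ht]
          simp
        · simp only [hp, Bool.false_eq_true, if_false]
          rw [ih]
          simp

theorem splitOn_join (sep s : List Char) :
    PySem.Chars.join sep (PySem.Chars.splitOn s sep) = s := by
  show PySem.Chars.join sep (PySem.Chars.splitOn.go sep (s.length + 1) s [] []) = s
  rw [go_join]
  simp [PySem.Chars.join, List.intercalate]

theorem get?_mk_append {κ ν : Type} [BEq κ] (l1 l2 : List (κ × ν)) (k : κ) :
    (PySem.Dict.mk (l1 ++ l2)).get? k = ((PySem.Dict.mk l1).get? k).or ((PySem.Dict.mk l2).get? k) := by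
  simp [PySem.Dict.get?, List.find?_append, Option.map_or]

-- s.split('-') returning exactly two parts reconstructs s
theorem split_pair (s p0 p1 : String) (h : PySem.Str.split? s "-" = some [p0, p1]) :
    s = String.ofList (p0.toList ++ "-".toList ++ p1.toList) := by
  have h2 : PySem.Chars.splitOn s.toList "-".toList = [p0.toList, p1.toList] := by
    have := PySem.Str.split?_map s "-"
    rw [h] at this
    simp [PySem.Chars.split?] at this
    exact this.symm
  have h3 := splitOn_join "-".toList s.toList
  rw [h2] at h3
  have h4 : PySem.Chars.join "-".toList [p0.toList, p1.toList]
      = p0.toList ++ "-".toList ++ p1.toList := by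
    simp [PySem.Chars.join, List.intercalate, List.intersperse, List.append_assoc]
  rw [h4] at h3
  rw [h3]
  exact String.ofList_toList.symm

theorem mem_keys_of_get?_some {ν : Type} (d : PySem.Dict String ν) (k : String) (v : ν)
    (h : d.get? k = some v) : k ∈ d.keys := by
  by_contra hk
  rw [(PySem.Dict.get?_eq_none_iff_not_mem_keys d k).mpr hk] at h
  cases h

theorem aCompound_eq (current : String) :
    aCompound current = (PySem.Dict.mk compItems).get? current := by
  by_cases hmem : current ∈ compItems.map Prod.fst
  · exact F2 current hmem
  · rw [(PySem.Dict.get?_eq_none_iff_not_mem_keys _ _).mpr (by rwa [PySem.Dict.keys_mk])]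
    unfold aCompound
    by_cases hin : PySem.Str.isIn "-" current
    · simp only [hin, if_true]
      rcases hsp : PySem.Str.split? current "-" with _ | parts
      · rfl
      · rcases parts with _ | ⟨p0, _ | ⟨p1, _ | _⟩⟩ <;> try rfl
        rcases ht : aTens.get? p0 with _ | tv
        · simp [ht]
        rcases hu : aUnits.get? p1 with _ | ⟨uv, suf⟩
        · simp [ht, hu]
        exfalso
        apply hmem
        have h0 : p0 ∈ aTens.keys := mem_keys_of_get?_some aTens p0 tv ht
        have h1 : p1 ∈ aUnits.keys := mem_keys_of_get?_some aUnits p1 (uv, suf) hu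
        rw [split_pair current p0 p1 hsp]
        exact F3 p0 h0 p1 h1
    · rw [Bool.not_eq_true] at hin
      rw [if_neg (by simpa using hin)]

-- association-list lookup is first-match lookup in the literal dict built from the same list
theorem lookup_eq_get?_mk {ν : Type} (k : String) (l : List (String × ν)) :
    List.lookup k l = (PySem.Dict.mk l).get? k := by
  induction l with
  | nil => simp [List.lookup, PySem.Dict.get?]
  | cons p rest ih =>
      obtain ⟨a, v⟩ := p
      have hcomm : (k == a) = (a == k) := by
        by_cases h : k = a
        · subst h; rfl
        · simp [h, Ne.symm h]
      rw [List.lookup, PySem.Dict.get?_mk_cons, ← hcomm]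
      by_cases h : (k == a) = true
      · simp [h]
      · simp only [Bool.not_eq_true] at h
        simp [h, ih]

theorem procA_eq_bWord (w : String) : procA w = bWord w := by
  unfold procA bWord
  dsimp only
  rw [PySem.Str.toList_lower]
  have hkey : String.ofList ((((PySem.Chars.lower w.toList).reverse.dropWhile
        (fun c => ",.;:!?".toList.contains c))).reverse)
      = pyRstrip (PySem.Str.lower w) ",.;:!?" := by
    unfold pyRstrip
    rw [PySem.Str.toList_lower]
  rw [hkey]
  rw [lookup_eq_get?_mk, F0, get?_mk_append]
  rw [aCompound_eq]
  set cur := pyRstrip (PySem.Str.lower w) ",.;:!?" with hcur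
  rcases hc : (PySem.Dict.mk compItems).get? cur with _ | v
  · rcases hb : (PySem.Dict.mk ordBase).get? cur with _ | v
    · simp [aOrdinalMap, hb, Option.or]
    · have hvmem : v ∈ ordBase.map Prod.snd := by
        have hit := PySem.Dict.mem_items_of_get?_eq_some _ hb
        exact List.mem_map.mpr ⟨_, hit, rfl⟩
      have hcap := F5 v hvmem
      rcases hw : w.toList with _ | ⟨c, cs⟩
      · exfalso
        have hcur0 : cur = "" := by
          rw [hcur]
          unfold pyRstrip
          rw [PySem.Str.toList_lower, hw]
          rfl
        rw [hcur0] at hb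
        have hnone : (PySem.Dict.mk ordBase).get? "" = none := by decide
        rw [hnone] at hb
        cases hb
      · simp only [aOrdinalMap, hb, Option.or, pyPunct]
        cases PySem.Chars.isupper c <;> simp [hcap, hw]
  · have hmem : cur ∈ compItems.map Prod.fst := by
      have := mem_keys_of_get?_some _ _ _ hc
      rwa [PySem.Dict.keys_mk] at this
    have hb : (PySem.Dict.mk ordBase).get? cur = none :=
      (PySem.Dict.get?_eq_none_iff_not_mem_keys _ _).mpr
        (by rw [PySem.Dict.keys_mk]; exact F4 _ hmem)
    simp [hb, hc, Option.or, pyPunct]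

theorem enumerate_map {α β : Type} (f : α → β) :
    ∀ (l : List α) (s : Int), (PySem.List.enumerate l s).map (fun p => f p.2) = l.map f := by
  intro l
  induction l with
  | nil => intro s; simp [PySem.List.enumerate]
  | cons x xs ih => intro s; simp [PySem.List.enumerate, ih]

-- ===== VERDICT =====
theorem convert_ordinals_spec : Claim_equal_convert_ordinals := by
  unfold Claim_equal_convert_ordinals Spec_convert_ordinals
  intro s _
  unfold convert_ordinals convert_ordinals_alt
  rw [PySem.List.foldl_append_singleton_eq_map, enumerate_map procA]
  have hfun : procA = bWord := funext procA_eq_bWord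
  rw [hfun, List.nil_append]
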